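-- pv_equiv track=rewrite | github.com/YangFengCodeCode/python-record | code25.py | calculateFreeze
-- ===== SOURCE A (Python) =====
-- def calculateFreeze(sensors):
--     """Calculate when the microcontroller will freeze for each test case"""
--     freezeTime = 0
--     sensorActive = 0
--     while sensorActive < 2: #Less than 2 sensors activate at the same time
--         freezeTime += 1
--         sensorActive = 0
--         for s in sensors: #Check how many sensors will activate at the same time
--             if freezeTime % s == 0:
--                 sensorActive += 1
--     return freezeTime
-- ===== SOURCE B (Python) =====
-- def calculateFreeze(sensors):
--     """Calculate when the microcontroller will freeze for each test case"""
--     def gcd(a, b):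
--         while b:
--             a, b = b, a % b
--         return a
--     t = sorted(abs(s) for s in sensors)
--     best = None
--     for i in range(len(t)):
--         a = t[i]
--         if best is not None and a >= best:
--             break
--         for j in range(i + 1, len(t)):
--             b = t[j]
--             if best is not None and b >= best:
--                 break
--             l = a * b // gcd(a, b)
--             if best is None or l < best:
--                 best = l
--     return best
-- ===== Notes on version B (the rewrite author's own statement) =====
-- stated objective: faster
-- what changed: Instead of counting time up one tick at a time until two sensor periods divide it simultaneously, B sorts the absolute periods and takes the minimum lcm over pairs, breaking out of either loop as soon as a period reaches the best lcm found (lcm(a,b) >= max(a,b)).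
import Mathlib
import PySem

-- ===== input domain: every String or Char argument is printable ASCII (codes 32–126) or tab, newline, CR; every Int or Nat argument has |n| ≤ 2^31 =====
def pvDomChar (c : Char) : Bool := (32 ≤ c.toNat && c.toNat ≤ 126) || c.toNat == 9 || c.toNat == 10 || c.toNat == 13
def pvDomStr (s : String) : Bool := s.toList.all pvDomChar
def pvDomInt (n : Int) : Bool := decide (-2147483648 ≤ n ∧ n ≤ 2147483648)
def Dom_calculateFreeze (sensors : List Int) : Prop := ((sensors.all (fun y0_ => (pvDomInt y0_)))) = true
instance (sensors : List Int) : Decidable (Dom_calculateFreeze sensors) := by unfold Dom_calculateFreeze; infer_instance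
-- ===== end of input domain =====

-- B replaces A's tick-by-tick search for the first time at which two sensor
-- periods divide the clock by a minimum of lcm over sensor pairs, scanning the
-- periods sorted by absolute value and stopping early once no pair can beat
-- the best lcm found (faster on the measured inputs).

-- ===== PORT A =====
-- A's unbounded `while sensorActive < 2` loop, ported with a fuel counter; the
-- fuel 2^64 exceeds the answer for every input admitted by Dom_ ∧ Pre_ (the
-- answer is at most the lcm of one pair ≤ 2^31 * 2^31), so on an admitted
-- input the fuel is never the reason the loop stops.
def loopA (sensors : List Int) : Nat → Int → Int
  | 0, t => t
  | fuel + 1, t =>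
      let t' := t + 1
      let active := sensors.foldl
        (fun acc s => if PySem.Int.mod t' s = 0 then acc + 1 else acc) (0 : Int)
      if active < 2 then loopA sensors fuel t' else t'

def calculateFreeze (sensors : List Int) : Int :=
  loopA sensors (2 ^ 64) 0

-- ===== PORT B =====
-- hand-written Euclid from Source B; Source B only calls it on nonnegative ints, where
-- Python's % is Nat.mod (the natAbs on the nonneg arguments is the identity)
def pyGcdGo (a b : Nat) : Nat :=
  if _h : b = 0 then a else pyGcdGo b (a % b)
termination_by b
decreasing_by exact Nat.mod_lt a (Nat.pos_of_ne_zero _h)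

def pyGcd (a b : Int) : Int := (pyGcdGo a.natAbs b.natAbs : Int)

-- inner `for j in range(i+1, len(t))` of Source B over the suffix after t[i],
-- with its `break` (best is not None and b >= best) as the first branch
def innerB (a : Int) : List Int → Option Int → Option Int
  | [], best => best
  | b :: rest, best =>
      let l := PySem.Int.floordiv (a * b) (pyGcd a b)
      match best with
      | some bb => if bb ≤ b then some bb
                   else innerB a rest (if l < bb then some l else some bb)
      | none => innerB a rest (some l)

-- outer `for i in range(len(t))` of Source B, with its `break` (a >= best)
def outerB : List Int → Option Int → Option Int
  | [], best => best
  | a :: rest, best =>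
      match best with
      | some bb => if bb ≤ a then some bb
                   else outerB rest (innerB a rest (some bb))
      | none => outerB rest (innerB a rest none)

def calculateFreeze_alt (sensors : List Int) : Int :=
  -- Python's Source B returns None when fewer than two sensors; only outside Pre_
  (outerB (PySem.List.sorted (sensors.map (fun s => |s|)) (fun x => x) false) none).getD 0

-- ===== PRECONDITION & SPEC =====
-- Pre_ excludes exactly the inputs where A does not return: with a 0 sensor A
-- raises ZeroDivisionError on the first tick, and with fewer than two sensors
-- A's while loop never ends.
def Pre_calculateFreeze (sensors : List Int) : Prop :=
  2 ≤ sensors.length ∧ (0 : Int) ∉ sensors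
instance (sensors : List Int) : Decidable (Pre_calculateFreeze sensors) := by
  unfold Pre_calculateFreeze; infer_instance

def pvWitness_calculateFreeze : List Int := [4, 6, 9]

def Spec_calculateFreeze (sensors : List Int) (out : Int) : Prop := out = calculateFreeze_alt sensors
instance (sensors : List Int) (out : Int) : Decidable (Spec_calculateFreeze sensors out) := by unfold Spec_calculateFreeze; infer_instance

-- ===== CLAIM (what is proved, stated in full; the proofs are below) =====
def Claim_equal_calculateFreeze : Prop := ∀ (sensors : List Int), Dom_calculateFreeze sensors → Pre_calculateFreeze sensors → Spec_calculateFreeze sensors (calculateFreeze sensors)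

-- ===== LEMMAS AND PROOFS =====

theorem pyGcdGo_eq (a b : Nat) : pyGcdGo a b = Nat.gcd a b := by
  induction b using Nat.strong_induction_on generalizing a with
  | _ b ih =>
      rw [pyGcdGo]
      by_cases h : b = 0
      · simp [h]
      · simp only [h, dite_false]
        rw [ih (a % b) (Nat.mod_lt a (Nat.pos_of_ne_zero h))]
        exact (Nat.gcd_comm b (a % b)).trans ((Nat.gcd_rec b a).symm.trans (Nat.gcd_comm b a))

-- the abstract value B's inner loop computes for a pair
def pyLcm (a b : Int) : Int := PySem.Int.floordiv ((a * b).natAbs : Int) (pyGcd a b)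

theorem pyLcm_eq (a b : Int) (ha : a ≠ 0) (hb : b ≠ 0) :
    pyLcm a b = (Int.lcm a b : Int) := by
  have hg : Nat.gcd a.natAbs b.natAbs ≠ 0 := by
    simp [Nat.gcd_eq_zero_iff, Int.natAbs_eq_zero, ha, hb]
  unfold pyLcm pyGcd
  rw [pyGcdGo_eq, PySem.Int.floordiv_natCast]
  unfold Int.lcm Nat.lcm
  rw [Int.natAbs_mul]

theorem pyLcm_pos (a b : Int) (ha : a ≠ 0) (hb : b ≠ 0) : 0 < pyLcm a b := by
  rw [pyLcm_eq a b ha hb]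
  exact_mod_cast Nat.pos_of_ne_zero (Nat.lcm_ne_zero
    (by simpa using ha) (by simpa using hb))

theorem dvd_pyLcm_left (a b : Int) (ha : a ≠ 0) (hb : b ≠ 0) : a ∣ pyLcm a b := by
  rw [pyLcm_eq a b ha hb]; exact Int.dvd_lcm_left a b

theorem dvd_pyLcm_right (a b : Int) (ha : a ≠ 0) (hb : b ≠ 0) : b ∣ pyLcm a b := by
  rw [pyLcm_eq a b ha hb]; exact Int.dvd_lcm_right a b

theorem pyLcm_dvd (a b t : Int) (ha : a ≠ 0) (hb : b ≠ 0) (h1 : a ∣ t) (h2 : b ∣ t) :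
    pyLcm a b ∣ t := by
  rw [pyLcm_eq a b ha hb]
  rw [Int.natCast_dvd]
  exact Nat.lcm_dvd (Int.natAbs_dvd_natAbs.mpr h1) (Int.natAbs_dvd_natAbs.mpr h2)

theorem pyLcm_le (a b : Int) (ha : a ≠ 0) (hb : b ≠ 0) :
    pyLcm a b ≤ a.natAbs * b.natAbs := by
  rw [pyLcm_eq a b ha hb]
  have : Int.lcm a b ≤ a.natAbs * b.natAbs :=
    Nat.le_of_dvd (Nat.mul_pos (Nat.pos_of_ne_zero (by simpa using ha))
      (Nat.pos_of_ne_zero (by simpa using hb))) (Nat.lcm_dvd_mul _ _)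
  exact_mod_cast this

theorem pyLcm_ge_right (a b : Int) (ha : 1 ≤ a) (hb : 1 ≤ b) : b ≤ pyLcm a b :=
  Int.le_of_dvd (pyLcm_pos a b (by omega) (by omega)) (dvd_pyLcm_right a b (by omega) (by omega))

-- the list of all pairwise lcms in pair order (the candidates B minimises over)
def pairLcms : List Int → List Int
  | [] => []
  | a :: r => r.map (fun b => pyLcm a b) ++ pairLcms r

-- the divisibility predicate A's inner loop counts
def pDiv (t : Int) : Int → Bool := fun s => decide (PySem.Int.mod t s = 0)

theorem foldl_count (t : Int) (l : List Int) (init : Int) :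
    l.foldl (fun acc s => if PySem.Int.mod t s = 0 then acc + 1 else acc) init
      = init + (l.countP (pDiv t) : Int) := by
  induction l generalizing init with
  | nil => simp
  | cons c r ih =>
      simp only [List.foldl_cons]
      by_cases h : PySem.Int.mod t c = 0
      · simp [h, ih, pDiv]; ring
      · simp [h, ih, pDiv]

-- every element of pairLcms comes from a split s = pre ++ a :: suf with b ∈ suf
theorem exists_pair_of_mem (s : List Int) (x : Int) (hx : x ∈ pairLcms s) :
    ∃ a pre suf, s = pre ++ a :: suf ∧ ∃ b ∈ suf, x = pyLcm a b := by
  induction s with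
  | nil => simp [pairLcms] at hx
  | cons c r ih =>
      simp only [pairLcms, List.mem_append, List.mem_map] at hx
      rcases hx with ⟨b, hb, rfl⟩ | hx
      · exact ⟨c, [], r, rfl, b, hb, rfl⟩
      · obtain ⟨a, pre, suf, hs, b, hb, rfl⟩ := ih hx
        exact ⟨a, c :: pre, suf, by simp [hs], b, hb, rfl⟩

theorem mem_of_pairLcms (s : List Int) (x : Int) (hx : x ∈ pairLcms s) :
    ∃ a b, a ∈ s ∧ b ∈ s ∧ x = pyLcm a b := by
  obtain ⟨a, pre, suf, hs, b, hb, rfl⟩ := exists_pair_of_mem s x hx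
  exact ⟨a, b, by simp [hs], by simp [hs, hb], rfl⟩

theorem countP_two_of_split (q : Int → Bool) (a b : Int) (pre suf : List Int)
    (hb : b ∈ suf) (hqa : q a = true) (hqb : q b = true) :
    2 ≤ (pre ++ a :: suf).countP q := by
  have h1 : 0 < suf.countP q := List.countP_pos_iff.mpr ⟨b, hb, hqb⟩
  rw [List.countP_append, List.countP_cons]
  simp [hqa]; omega

theorem pair_of_countP (s : List Int) (q : Int → Bool) (h : 2 ≤ s.countP q) :
    ∃ a b, q a = true ∧ q b = true ∧ pyLcm a b ∈ pairLcms s := by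
  induction s with
  | nil => simp at h
  | cons c r ih =>
      rw [List.countP_cons] at h
      by_cases hc : q c = true
      · have : 0 < r.countP q := by simp only [hc, if_true] at h; omega
        obtain ⟨b, hb, hqb⟩ := List.countP_pos_iff.mp this
        exact ⟨c, b, hc, hqb, by simp [pairLcms, List.mem_append]; left; exact ⟨b, hb, rfl⟩⟩
      · simp [hc] at h
        obtain ⟨a, b, hqa, hqb, hmem⟩ := ih h
        exact ⟨a, b, hqa, hqb, by simp [pairLcms, List.mem_append, hmem]⟩

-- ----- B's pruned double loop computes min? of pairLcms of the sorted list -----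

-- the fold step B's `best` update performs
def stepB : Option Int → Int → Option Int
  | none, l => some l
  | some bb, l => if l < bb then some l else some bb

theorem foldl_stepB_const (l : List Int) (v : Int) (h : ∀ x ∈ l, v ≤ x) :
    l.foldl stepB (some v) = some v := by
  induction l with
  | nil => rfl
  | cons x r ih =>
      have hx : ¬ x < v := by have := h x (by simp); omega
      simp only [List.foldl_cons, stepB, hx, if_false]
      exact ih (fun y hy => h y (by simp [hy]))

theorem foldl_stepB_eq_min? (l : List Int) :
    l.foldl stepB none = PySem.List.min? l (fun y => y) := by
  cases l with
  | nil => rfl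
  | cons x r =>
      rw [PySem.List.min?_id_cons]
      simp only [List.foldl_cons, stepB]
      induction r generalizing x with
      | nil => rfl
      | cons y r ih =>
          simp only [List.foldl_cons, stepB]
          by_cases h : y < x
          · simp [h, le_of_lt h, ih]
          · have : min x y = x := by omega
            simp [h, this, ih]

theorem innerB_spec (a : Int) (rest : List Int) (best : Option Int)
    (hpw : rest.Pairwise (· ≤ ·)) (hpos : ∀ x ∈ rest, 1 ≤ x) (ha : 1 ≤ a) :
    innerB a rest best = (rest.map (fun b => pyLcm a b)).foldl stepB best := by
  induction rest generalizing best with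
  | nil => rfl
  | cons b r ih =>
      have hb1 : 1 ≤ b := hpos b (by simp)
      have hpwr := List.Pairwise.of_cons hpw
      have hposr : ∀ x ∈ r, 1 ≤ x := fun x hx => hpos x (by simp [hx])
      have hab : PySem.Int.floordiv (a * b) (pyGcd a b) = pyLcm a b := by
        unfold pyLcm
        rw [Int.natAbs_of_nonneg (by positivity)]
      cases best with
      | none =>
          simp only [innerB, hab, List.map_cons, List.foldl_cons, stepB]
          exact ih (some (pyLcm a b)) hpwr hposr
      | some bb =>
          simp only [innerB, hab, List.map_cons, List.foldl_cons]
          by_cases hbrk : bb ≤ b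
          · rw [if_pos hbrk]
            have hstep : stepB (some bb) (pyLcm a b) = some bb := by
              have : ¬ pyLcm a b < bb := by
                have := pyLcm_ge_right a b ha hb1; omega
              simp [stepB, this]
            rw [hstep]
            refine (foldl_stepB_const _ _ ?_).symm
            intro y hy
            obtain ⟨c, hc, rfl⟩ := List.mem_map.mp hy
            have hc1 : 1 ≤ c := hposr c hc
            have hbc : b ≤ c := (List.pairwise_cons.mp hpw).1 c hc
            have := pyLcm_ge_right a c ha hc1
            omega
          · rw [if_neg hbrk]
            rw [ih _ hpwr hposr]
            have : stepB (some bb) (pyLcm a b) =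
                (if pyLcm a b < bb then some (pyLcm a b) else some bb) := rfl
            rw [this]

theorem outerB_spec (t : List Int) (best : Option Int)
    (hpw : t.Pairwise (· ≤ ·)) (hpos : ∀ x ∈ t, 1 ≤ x) :
    outerB t best = (pairLcms t).foldl stepB best := by
  induction t generalizing best with
  | nil => rfl
  | cons a r ih =>
      have ha1 : 1 ≤ a := hpos a (by simp)
      have hpwr := List.Pairwise.of_cons hpw
      have hposr : ∀ x ∈ r, 1 ≤ x := fun x hx => hpos x (by simp [hx])
      cases best with
      | none =>
          simp only [outerB]
          rw [innerB_spec a r none hpwr hposr ha1, ih _ hpwr hposr]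
          simp [pairLcms, List.foldl_append]
      | some bb =>
          simp only [outerB]
          by_cases hbrk : bb ≤ a
          · rw [if_pos hbrk]
            refine (foldl_stepB_const _ _ ?_).symm
            intro y hy
            obtain ⟨c, d, hc, hd, rfl⟩ := mem_of_pairLcms _ y hy
            have hc1 : 1 ≤ c := hpos c hc
            have hd1 : 1 ≤ d := hpos d hd
            have had : a ≤ d := by
              rcases List.mem_cons.mp hd with h | h
              · omega
              · exact (List.pairwise_cons.mp hpw).1 d h
            have := pyLcm_ge_right c d hc1 hd1
            omega
          · rw [if_neg hbrk]
            rw [innerB_spec a r (some bb) hpwr hposr ha1, ih _ hpwr hposr]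
            simp [pairLcms, List.foldl_append]

theorem pairLcms_ne_nil (a b : Int) (r : List Int) :
    pairLcms (a :: b :: r) ≠ [] := by
  simp [pairLcms]

-- the loop of A stops exactly at the least time L with two simultaneous divisors
theorem loopA_eq (sensors : List Int) (L : Int)
    (hcntL : 2 ≤ sensors.countP (pDiv L))
    (hmin : ∀ u : Int, 0 < u → u < L → sensors.countP (pDiv u) < 2) :
    ∀ (fuel : Nat) (t : Int), 0 ≤ t → t < L → L ≤ t + fuel →
      loopA sensors fuel t = L := by
  intro fuel
  induction fuel with
  | zero => intro t _ h1 h2; omega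
  | succ n ih =>
      intro t ht h1 h2
      rw [loopA]
      simp only [foldl_count, Int.zero_add]
      by_cases hL : t + 1 = L
      · rw [hL]
        have : ¬ ((sensors.countP (pDiv L) : Int) < 2) := by exact_mod_cast by omega
        simp [this]
      · have hlt : t + 1 < L := by omega
        have hc : sensors.countP (pDiv (t + 1)) < 2 := hmin (t + 1) (by omega) hlt
        have : ((sensors.countP (pDiv (t + 1)) : Int) < 2) := by exact_mod_cast hc
        simp only [this, if_true]
        exact ih (t + 1) (by omega) hlt (by omega)

-- ===== VERDICT (by name: the statement is the Claim_ definition above) =====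
theorem calculateFreeze_spec : Claim_equal_calculateFreeze := by
  intro sensors hdom hpre
  obtain ⟨hlen, hz⟩ := hpre
  have hdomAll : ∀ s ∈ sensors, pvDomInt s = true := by
    have := hdom; unfold Dom_calculateFreeze at this
    rw [List.all_eq_true] at this; exact this
  -- the sorted list of absolute values B scans
  set u := PySem.List.sorted (sensors.map (fun s => |s|)) (fun x => x) false with hu
  have hperm : u.Perm (sensors.map (fun s => |s|)) := PySem.List.sorted_perm _ _ _
  have hmemu : ∀ x ∈ u, ∃ s ∈ sensors, x = |s| := by
    intro x hx
    have : x ∈ sensors.map (fun s => |s|) := hperm.mem_iff.mp hx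
    obtain ⟨s, hs, rfl⟩ := List.mem_map.mp this
    exact ⟨s, hs, rfl⟩
  have hpos : ∀ x ∈ u, 1 ≤ x := by
    intro x hx
    obtain ⟨s, hs, rfl⟩ := hmemu x hx
    have : s ≠ 0 := fun h => hz (h ▸ hs)
    have := abs_pos.mpr this
    omega
  have hbnd : ∀ x ∈ u, x ≤ 2 ^ 31 := by
    intro x hx
    obtain ⟨s, hs, rfl⟩ := hmemu x hx
    have := hdomAll s hs
    simp only [pvDomInt, decide_eq_true_eq] at this
    exact abs_le.mpr ⟨by omega, by omega⟩
  have hpw : u.Pairwise (· ≤ ·) := PySem.List.sorted_pairwise _ _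
  -- u has at least two elements, so pairLcms u is nonempty
  obtain ⟨a0, b0, r0, hu2⟩ : ∃ a b r, u = a :: b :: r := by
    have hlu : 2 ≤ u.length := by
      rw [hperm.length_eq, List.length_map]; exact hlen
    match u, hlu with
    | a :: b :: r, _ => exact ⟨a, b, r, rfl⟩
  have hne : pairLcms u ≠ [] := hu2 ▸ pairLcms_ne_nil a0 b0 r0
  -- B's pruned loop = min? of all pair lcms of u
  have houter : outerB u none = PySem.List.min? (pairLcms u) (fun y => y) := by
    rw [outerB_spec u none hpw hpos, foldl_stepB_eq_min?]
  obtain ⟨L, hL⟩ : ∃ L, PySem.List.min? (pairLcms u) (fun y => y) = some L := by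
    cases hmin : PySem.List.min? (pairLcms u) (fun y => y) with
    | none => exact absurd ((PySem.List.min?_eq_none_iff _ _).mp hmin) hne
    | some L => exact ⟨L, rfl⟩
  have hmem := PySem.List.min?_mem hL
  have hisMin : ∀ y ∈ pairLcms u, L ≤ y := PySem.List.min?_isMin hL
  -- countP of the divisibility predicate transfers between u and sensors
  have htrans : ∀ v : Int, u.countP (pDiv v) = sensors.countP (pDiv v) := by
    intro v
    rw [hperm.countP_eq, List.countP_map]
    refine List.countP_congr ?_
    intro s _
    simp [pDiv, Function.comp, PySem.Int.mod_eq_zero_iff_dvd, abs_dvd]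
  obtain ⟨a, pre, suf, hsplit, b, hbsuf, hLab⟩ := exists_pair_of_mem u L hmem
  have ha1 : 1 ≤ a := hpos a (by simp [hsplit])
  have hb1 : 1 ≤ b := hpos b (by simp [hsplit]; right; right; exact hbsuf)
  have ha0 : a ≠ 0 := by omega
  have hb0 : b ≠ 0 := by omega
  -- L is positive
  have hLpos : 0 < L := hLab ▸ pyLcm_pos a b ha0 hb0
  -- two sensors divide L
  have hcntL : 2 ≤ sensors.countP (pDiv L) := by
    rw [← htrans, hsplit]
    refine countP_two_of_split _ a b pre suf hbsuf ?_ ?_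
    · simp only [pDiv, decide_eq_true_eq, PySem.Int.mod_eq_zero_iff_dvd]
      exact hLab ▸ dvd_pyLcm_left a b ha0 hb0
    · simp only [pDiv, decide_eq_true_eq, PySem.Int.mod_eq_zero_iff_dvd]
      exact hLab ▸ dvd_pyLcm_right a b ha0 hb0
  -- no earlier positive time has two divisors
  have hmin : ∀ v : Int, 0 < v → v < L → sensors.countP (pDiv v) < 2 := by
    intro v hv hvlt
    by_contra hc
    rw [not_lt, ← htrans] at hc
    obtain ⟨a', b', hqa, hqb, hmem'⟩ := pair_of_countP u (pDiv v) hc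
    simp only [pDiv, decide_eq_true_eq, PySem.Int.mod_eq_zero_iff_dvd] at hqa hqb
    have hdvd : pyLcm a' b' ∣ v :=
      pyLcm_dvd a' b' v
        (fun h => by simp [h] at hqa; omega)
        (fun h => by simp [h] at hqb; omega)
        hqa hqb
    have hle : pyLcm a' b' ≤ v := Int.le_of_dvd hv hdvd
    have hLle : L ≤ pyLcm a' b' := hisMin _ hmem'
    omega
  -- bound on L from Dom, so the fuel 2^64 suffices
  have hbound : L ≤ 0 + (2 ^ 64 : Nat) := by
    have hba : a ≤ 2 ^ 31 := hbnd a (by simp [hsplit])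
    have hbb : b ≤ 2 ^ 31 := hbnd b (by simp [hsplit]; right; right; exact hbsuf)
    have hna : a.natAbs ≤ 2 ^ 31 := by omega
    have hnb : b.natAbs ≤ 2 ^ 31 := by omega
    have h1 : L ≤ (a.natAbs * b.natAbs : Nat) := hLab ▸ pyLcm_le a b ha0 hb0
    have h2 : (a.natAbs * b.natAbs : Nat) ≤ 2 ^ 31 * 2 ^ 31 :=
      Nat.mul_le_mul hna hnb
    have h3 : ((a.natAbs * b.natAbs : Nat) : Int) ≤ ((2 ^ 31 * 2 ^ 31 : Nat) : Int) := by
      exact_mod_cast h2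
    push_cast at h3
    omega
  -- conclude
  unfold Spec_calculateFreeze calculateFreeze calculateFreeze_alt
  rw [← hu, houter, hL]
  exact loopA_eq sensors L hcntL hmin (2 ^ 64) 0 le_rfl hLpos hbound
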